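-- pv_equiv track=rewrite | github.com/samanenasiri/Pre_ML_Exercises | Exercise_W4/date.py | shamsi_to_miladi
-- ===== SOURCE A (Python) =====
-- def shamsi_to_miladi(year,month,day):
--     sal_kabiseh_shamsi=year//4
--     roz_sal_shamsi=(year-1)*365
--     if month<7:
--         roz_mah_shamsi=(month-1)*31
--     else:
--         roz_mah_shamsi=(month-1)*31
--     kol_rozha_shamsi=roz_sal_shamsi + roz_mah_shamsi + day + sal_kabiseh_shamsi
--     kol_rozha_miladi=kol_rozha_shamsi+226899
--
--
--     sal_kabiseh_miladi=(year+621)//4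
--
--     sal_miladi=((kol_rozha_miladi-sal_kabiseh_miladi)//365)+1
--
--
--     roz_miladi=(kol_rozha_miladi-sal_kabiseh_miladi)%365
--
--     miladi_month_list=( 31, 29, 31, 30, 31, 30, 31, 31, 30, 31, 30, 31)
--
--     month_index=0
--     while roz_miladi>miladi_month_list[month_index] and month_index<12:
--         roz_miladi-=miladi_month_list[month_index]
--         month_index+=1
--     mah_miladi=month_index+1
--     return "*** year:", sal_miladi,"month: ", mah_miladi,"  day: ",roz_miladi," ***"
-- ===== SOURCE B (Python) =====
-- def shamsi_to_miladi(year, month, day):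
--     # Same arithmetic prelude, then a cumulative-sum table scan instead of the subtracting while-loop.
--     kol_rozha_miladi = (year - 1) * 365 + (month - 1) * 31 + day + year // 4 + 226899
--     n = kol_rozha_miladi - (year + 621) // 4
--     sal_miladi = n // 365 + 1
--     roz_miladi = n % 365
--     miladi_month_list = (31, 29, 31, 30, 31, 30, 31, 31, 30, 31, 30, 31)
--     cum = [0]
--     for m in miladi_month_list:
--         cum.append(cum[-1] + m)
--     month_index = next(k for k in range(12) if cum[k + 1] >= roz_miladi)
--     return "*** year:", sal_miladi, "month: ", month_index + 1, "  day: ", roz_miladi - cum[month_index], " ***"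
-- ===== Notes on version B (the rewrite author's own statement) =====
-- stated objective: alternative
-- what changed: Replaced A's destructive while-loop that repeatedly subtracts month lengths from the day-of-year by building a cumulative-sum table once and scanning it for the first prefix sum >= day-of-year; the day becomes a single subtraction of the table entry.
import Mathlib
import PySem

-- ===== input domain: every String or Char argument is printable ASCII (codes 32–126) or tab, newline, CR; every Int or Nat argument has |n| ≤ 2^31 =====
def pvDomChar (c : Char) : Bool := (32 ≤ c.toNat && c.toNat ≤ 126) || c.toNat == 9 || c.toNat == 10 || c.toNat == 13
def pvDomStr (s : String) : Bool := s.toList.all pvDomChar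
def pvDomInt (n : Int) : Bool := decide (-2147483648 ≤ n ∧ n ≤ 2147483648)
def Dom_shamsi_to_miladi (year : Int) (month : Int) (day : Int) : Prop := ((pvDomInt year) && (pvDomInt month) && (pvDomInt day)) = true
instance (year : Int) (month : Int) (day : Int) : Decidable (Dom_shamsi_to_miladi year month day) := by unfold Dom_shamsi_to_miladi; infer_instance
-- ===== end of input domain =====

-- B replaces A's subtracting while-loop over the month lengths by a cumulative-sum table scan (different decomposition, same cost).


-- ===== PORT A =====
def miladiMonthList : List Int := [31, 29, 31, 30, 31, 30, 31, 31, 30, 31, 30, 31]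

-- A's while loop: while roz > list[idx] and idx < 12: roz -= list[idx]; idx += 1.
-- The 'none' branch is Python's IndexError; it is unreachable from idx = 0 (roz starts < 365).
def aLoopFuel : Nat → Int → Int → Int × Int
  | 0, roz, idx => (roz, idx)
  | fuel + 1, roz, idx =>
    match PySem.List.pyGet? miladiMonthList idx with
    | none => (roz, idx)
    | some m =>
      if roz > m ∧ idx < 12 then aLoopFuel fuel (roz - m) (idx + 1) else (roz, idx)

-- fuel 13 is a totality guard only: the 'idx < 12' test stops the loop after at most 12 steps
def aLoop (roz : Int) (idx : Int) : Int × Int := aLoopFuel 13 roz idx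

def shamsi_to_miladi (year : Int) (month : Int) (day : Int) : String × Int × String × Int × String × Int × String :=
  let sal_kabiseh_shamsi := PySem.Int.floordiv year 4
  let roz_sal_shamsi := (year - 1) * 365
  let roz_mah_shamsi := if month < 7 then (month - 1) * 31 else (month - 1) * 31
  let kol_rozha_shamsi := roz_sal_shamsi + roz_mah_shamsi + day + sal_kabiseh_shamsi
  let kol_rozha_miladi := kol_rozha_shamsi + 226899
  let sal_kabiseh_miladi := PySem.Int.floordiv (year + 621) 4
  let sal_miladi := PySem.Int.floordiv (kol_rozha_miladi - sal_kabiseh_miladi) 365 + 1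
  let roz_miladi := PySem.Int.mod (kol_rozha_miladi - sal_kabiseh_miladi) 365
  let p := aLoop roz_miladi 0
  ("*** year:", sal_miladi, "month: ", p.2 + 1, "  day: ", p.1, " ***")

-- ===== PORT B =====
-- cum = [0]; for m in months: cum.append(cum[-1] + m)
def bCum : List Int :=
  miladiMonthList.foldl (fun c m => c ++ [(PySem.List.pyGet? c (-1)).getD 0 + m]) [0]

-- next(k for k in range(12) if cum[k+1] >= roz); StopIteration unreachable (cum[12] = 366 > roz),
-- and cum[k+1] is always in range, so the getD defaults are never used.
def bIdx (roz : Int) : Int :=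
  (((PySem.List.pyRange 0 12 1).find? (fun k => decide ((PySem.List.pyGet? bCum (k + 1)).getD 0 ≥ roz))).getD 0)

def shamsi_to_miladi_alt (year : Int) (month : Int) (day : Int) : String × Int × String × Int × String × Int × String :=
  let kol_rozha_miladi := (year - 1) * 365 + (month - 1) * 31 + day + PySem.Int.floordiv year 4 + 226899
  let n := kol_rozha_miladi - PySem.Int.floordiv (year + 621) 4
  let sal_miladi := PySem.Int.floordiv n 365 + 1
  let roz_miladi := PySem.Int.mod n 365
  let month_index := bIdx roz_miladi
  ("*** year:", sal_miladi, "month: ", month_index + 1, "  day: ",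
    roz_miladi - (PySem.List.pyGet? bCum month_index).getD 0, " ***")

-- ===== PRECONDITION & SPEC =====
def Spec_shamsi_to_miladi (year : Int) (month : Int) (day : Int) (out : String × Int × String × Int × String × Int × String) : Prop := out = shamsi_to_miladi_alt year month day
instance (year : Int) (month : Int) (day : Int) (out : String × Int × String × Int × String × Int × String) : Decidable (Spec_shamsi_to_miladi year month day out) := by unfold Spec_shamsi_to_miladi; infer_instance

-- ===== CLAIM (what is proved, stated in full; the proofs are below) =====
def Claim_equal_shamsi_to_miladi : Prop := ∀ (year : Int) (month : Int) (day : Int), Dom_shamsi_to_miladi year month day → Spec_shamsi_to_miladi year month day (shamsi_to_miladi year month day)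

-- ===== LEMMAS AND PROOFS =====

-- For every possible day-in-year value 0..364, A's loop ends at B's month index and day.
set_option maxRecDepth 100000 in
theorem key : ∀ r : Fin 365,
    aLoop (r : Int) 0 = ((r : Int) - (PySem.List.pyGet? bCum (bIdx (r : Int))).getD 0, bIdx (r : Int)) := by
  decide

theorem aLoop_eq (roz : Int) (h0 : 0 ≤ roz) (h1 : roz < 365) :
    aLoop roz 0 = (roz - (PySem.List.pyGet? bCum (bIdx roz)).getD 0, bIdx roz) := by
  have hr : roz = ((⟨roz.toNat, by omega⟩ : Fin 365) : Int) := by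
    simp [Int.toNat_of_nonneg h0]
  rw [hr]; exact key _

-- ===== VERDICT (by name: the statement is the Claim_ definition above) =====
theorem shamsi_to_miladi_spec : Claim_equal_shamsi_to_miladi := by
  intro year month day _
  unfold Spec_shamsi_to_miladi shamsi_to_miladi shamsi_to_miladi_alt
  dsimp only
  have hif : (if month < 7 then (month - 1) * 31 else (month - 1) * 31) = (month - 1) * 31 := by
    split <;> rfl
  rw [hif]
  have h0 : 0 ≤ PySem.Int.mod ((year - 1) * 365 + (month - 1) * 31 + day + PySem.Int.floordiv year 4 + 226899 - PySem.Int.floordiv (year + 621) 4) 365 := by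
    rw [PySem.Int.mod_eq_emod_of_pos (by norm_num : (0:Int) < 365)]
    exact Int.emod_nonneg _ (by norm_num)
  have h1 : PySem.Int.mod ((year - 1) * 365 + (month - 1) * 31 + day + PySem.Int.floordiv year 4 + 226899 - PySem.Int.floordiv (year + 621) 4) 365 < 365 := by
    rw [PySem.Int.mod_eq_emod_of_pos (by norm_num : (0:Int) < 365)]
    exact Int.emod_lt_of_pos _ (by norm_num)
  rw [aLoop_eq _ h0 h1]
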